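-- pv_equiv track=rewrite | github.com/ogkourlias/BDC | Assignment3/assignment3.py | score_getter
-- ===== SOURCE A (Python) =====
-- def score_getter(lines):
--     """
--     Gets the scores and indexes for lines
--     :param lines:
--     :return:
--     """
--     pos_scores = []
--     pos_counts = []
--     pos_dict = {}
--     for line in lines:
--         for i in range(len(line)):
--             if len(pos_scores) > i:
--                 pos_dict[i] = pos_dict[i] + 1
--                 pos_counts[i] += 1
--                 pos_scores[i] += ord(line[i]) - 33
--             else:
--                 pos_dict[i] = 1
--                 pos_counts.append(1)
--                 pos_scores.append(ord(line[i]) - 33)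
--
--     return pos_scores, pos_counts
-- ===== SOURCE B (Python) =====
-- def score_getter(lines):
--     """
--     Gets the scores and indexes for lines
--     :param lines:
--     :return:
--     """
--     longest = max(map(len, lines), default=0)
--     pos_scores = []
--     pos_counts = []
--     for i in range(longest):
--         col = [line[i] for line in lines if len(line) > i]
--         pos_counts.append(len(col))
--         pos_scores.append(sum(ord(c) - 33 for c in col))
--     return pos_scores, pos_counts
-- ===== Notes on version B (the rewrite author's own statement) =====
-- stated objective: faster
-- what changed: Replaces A's row-major grow-or-update loop with its per-character dict bookkeeping by a column-major pass: for each position up to the longest line, collect that column's characters and append their count and score sum directly.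
import Mathlib
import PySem

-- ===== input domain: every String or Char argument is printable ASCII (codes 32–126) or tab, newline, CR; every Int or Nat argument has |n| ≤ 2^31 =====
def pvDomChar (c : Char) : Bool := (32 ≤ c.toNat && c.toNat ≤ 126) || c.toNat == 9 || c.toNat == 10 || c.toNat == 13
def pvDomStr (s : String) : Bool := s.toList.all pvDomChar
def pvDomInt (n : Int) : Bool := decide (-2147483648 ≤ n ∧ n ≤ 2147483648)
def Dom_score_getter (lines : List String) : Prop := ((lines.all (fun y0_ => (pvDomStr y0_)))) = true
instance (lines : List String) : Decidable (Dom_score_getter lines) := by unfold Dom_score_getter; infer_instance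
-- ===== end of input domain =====

-- B replaces A's row-major grow-or-update loop (with dict bookkeeping) by a
-- column-major pass over positions; objective: faster (timing run measured a
-- constant-factor speedup from dropping the per-character dict/branch work).

-- ===== PORT A =====
-- Literal transliteration: state (pos_dict, pos_scores, pos_counts),
-- outer loop over lines, inner loop over range(len(line)) with the
-- grow-or-update branch; returns (pos_scores, pos_counts).
def score_getter (lines : List String) : List Int × List Int :=
  let fin :=
    lines.foldl
      (fun st line =>
        (List.range line.toList.length).foldl
          (fun (st : PySem.Dict Int Int × List Int × List Int) i =>
            if st.2.1.length > i then
              (st.1.insert (i : Int) (st.1.getD (i : Int) 0 + 1),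
               st.2.1.set i (st.2.1.getD i 0 + (((line.toList.getD i ' ').toNat : Int) - 33)),
               st.2.2.set i (st.2.2.getD i 0 + 1))
            else
              (st.1.insert (i : Int) 1,
               st.2.1 ++ [((line.toList.getD i ' ').toNat : Int) - 33],
               st.2.2 ++ [1]))
          st)
      (PySem.Dict.empty, ([] : List Int), ([] : List Int))
  (fin.2.1, fin.2.2)

-- ===== PORT B =====
-- Transliteration of Source B: longest = max(map(len, lines), default=0); for each
-- position i, the column col = [line[i] for line in lines if len(line) > i],
-- append len(col) and sum(ord(c)-33 for c in col).
def score_getter_alt (lines : List String) : List Int × List Int :=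
  let longest := lines.foldl (fun a line => max a line.toList.length) 0
  let scores := (List.range longest).map (fun i =>
    (((lines.filter (fun line => line.toList.length > i)).map
        (fun line => line.toList.getD i ' ')).map
      (fun c => ((c.toNat : Int) - 33))).sum)
  let counts := (List.range longest).map (fun i =>
    (((lines.filter (fun line => line.toList.length > i)).map
        (fun line => line.toList.getD i ' ')).length : Int))
  (scores, counts)

-- ===== PRECONDITION & SPEC =====
def Spec_score_getter (lines : List String) (out : List Int × List Int) : Prop := out = score_getter_alt lines
instance (lines : List String) (out : List Int × List Int) : Decidable (Spec_score_getter lines out) := by unfold Spec_score_getter; infer_instance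

-- ===== CLAIM (what is proved, stated in full; the proofs are below) =====
def Claim_equal_score_getter : Prop := ∀ (lines : List String), Dom_score_getter lines → Spec_score_getter lines (score_getter lines)

-- ===== LEMMAS AND PROOFS =====

def pvLen (l : String) : Nat := l.toList.length
def pvVal (l : String) (i : Nat) : Int := ((l.toList.getD i ' ').toNat : Int) - 33
def pvMax (lines : List String) : Nat := lines.foldl (fun a l => max a (pvLen l)) 0
def pvS (lines : List String) (i : Nat) : Int :=
  (lines.map (fun l => if i < pvLen l then pvVal l i else 0)).sum
def pvC (lines : List String) (i : Nat) : Int :=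
  (lines.map (fun l => if i < pvLen l then (1 : Int) else 0)).sum

def step2 (l : String) (st : List Int × List Int) (i : Nat) : List Int × List Int :=
  if st.1.length > i then
    (st.1.set i (st.1.getD i 0 + pvVal l i), st.2.set i (st.2.getD i 0 + 1))
  else
    (st.1 ++ [pvVal l i], st.2 ++ [1])

def foldA (lines : List String) : List Int × List Int :=
  lines.foldl (fun st l => (List.range (pvLen l)).foldl (step2 l) st) ([], [])

lemma foldl_proj {σ τ ι : Type} (F : σ × τ → ι → σ × τ) (G : τ → ι → τ)
    (h : ∀ st i, (F st i).2 = G st.2 i) :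
    ∀ (xs : List ι) (st : σ × τ), (xs.foldl F st).2 = xs.foldl G st.2 := by
  intro xs
  induction xs with
  | nil => intro st; rfl
  | cons x xs ih => intro st; simp only [List.foldl_cons, ih, h]

lemma score_getter_eq_foldA (lines : List String) : score_getter lines = foldA lines := by
  show ((lines.foldl _ (PySem.Dict.empty, ([] : List Int), ([] : List Int))).2.1,
        (lines.foldl _ (PySem.Dict.empty, ([] : List Int), ([] : List Int))).2.2) = _
  have h := foldl_proj
    (σ := PySem.Dict Int Int) (τ := List Int × List Int) (ι := String)
    (fun st line =>
      (List.range line.toList.length).foldl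
        (fun (st : PySem.Dict Int Int × List Int × List Int) i =>
          if st.2.1.length > i then
            (st.1.insert (i : Int) (st.1.getD (i : Int) 0 + 1),
             st.2.1.set i (st.2.1.getD i 0 + (((line.toList.getD i ' ').toNat : Int) - 33)),
             st.2.2.set i (st.2.2.getD i 0 + 1))
          else
            (st.1.insert (i : Int) 1,
             st.2.1 ++ [((line.toList.getD i ' ').toNat : Int) - 33],
             st.2.2 ++ [1]))
        st)
    (fun st l => (List.range (pvLen l)).foldl (step2 l) st)
    (by
      intro st line
      have h2 := foldl_proj
        (σ := PySem.Dict Int Int) (τ := List Int × List Int) (ι := Nat)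
        (fun (st : PySem.Dict Int Int × List Int × List Int) i =>
          if st.2.1.length > i then
            (st.1.insert (i : Int) (st.1.getD (i : Int) 0 + 1),
             st.2.1.set i (st.2.1.getD i 0 + (((line.toList.getD i ' ').toNat : Int) - 33)),
             st.2.2.set i (st.2.2.getD i 0 + 1))
          else
            (st.1.insert (i : Int) 1,
             st.2.1 ++ [((line.toList.getD i ' ').toNat : Int) - 33],
             st.2.2 ++ [1]))
        (step2 line)
        (by
          intro st i
          by_cases h : st.2.1.length > i <;> simp [step2, h, pvVal])
        (List.range line.toList.length) st
      simpa [pvLen] using h2)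
    lines (PySem.Dict.empty, ([], []))
  exact h

lemma getD_map_range (f : Nat → Int) {n k : Nat} (h : k < n) :
    ((List.range n).map f).getD k 0 = f k := by
  simp [List.getD_eq_getElem?_getD, List.getElem?_eq_getElem (by simpa using h : k < ((List.range n).map f).length)]

lemma set_map_range (f : Nat → Int) (v : Int) {n k : Nat} (h : k < n) :
    ((List.range n).map f).set k v = (List.range n).map (fun i => if i = k then v else f i) := by
  apply List.ext_getElem
  · simp
  · intro i h1 h2
    simp only [List.getElem_set, List.getElem_map, List.getElem_range]
    rcases eq_or_ne k i with rfl | hne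
    · simp
    · rw [if_neg hne, if_neg (Ne.symm hne)]

lemma map_range_congr {f g : Nat → Int} {n : Nat} (h : ∀ i < n, f i = g i) :
    (List.range n).map f = (List.range n).map g := by
  apply List.map_congr_left
  intro i hi
  exact h i (List.mem_range.mp hi)

lemma inner_eq (l : String) (L m : Nat) (S C : Nat → Int) :
    (List.range L).foldl (step2 l) ((List.range m).map S, (List.range m).map C)
    = ((List.range (max m L)).map
        (fun i => if i < L then (if i < m then S i + pvVal l i else pvVal l i) else S i),
       (List.range (max m L)).map
        (fun i => if i < L then (if i < m then C i + 1 else 1) else C i)) := by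
  induction L with
  | zero =>
    simp only [List.range_zero, List.foldl_nil, Nat.max_zero]
    constructor
  | succ L ih =>
    rw [List.range_succ, List.foldl_append, ih, List.foldl_cons, List.foldl_nil]
    by_cases hm : L < m
    · have hmax : max m L = m := Nat.max_eq_left (Nat.le_of_lt hm)
      have hmax' : max m (L + 1) = m := Nat.max_eq_left hm
      rw [hmax, hmax']
      simp only [step2, List.length_map, List.length_range]
      rw [if_pos hm]
      rw [getD_map_range _ hm, getD_map_range _ hm, set_map_range _ _ hm, set_map_range _ _ hm]
      simp only [Prod.mk.injEq]
      refine ⟨?_, ?_⟩ <;>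
      · apply map_range_congr
        intro i hi
        rcases Nat.lt_trichotomy i L with h | rfl | h
        · simp [h, Nat.lt_succ_of_lt h, Nat.ne_of_lt h]
        · simp [hm]
        · simp [Nat.lt_asymm h, (Nat.ne_of_lt h).symm, show ¬ i < L + 1 by omega]
    · have hmL : m ≤ L := Nat.le_of_not_lt hm
      have hmax : max m L = L := Nat.max_eq_right hmL
      have hmax' : max m (L + 1) = L + 1 := Nat.max_eq_right (Nat.le_succ_of_le hmL)
      rw [hmax, hmax']
      simp only [step2, List.length_map, List.length_range]
      rw [if_neg (by omega)]
      rw [List.range_succ, List.map_append, List.map_append]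
      simp only [Prod.mk.injEq]
      refine ⟨?_, ?_⟩ <;>
      · rw [List.map_singleton]
        congr 1
        · apply map_range_congr; intro i hi
          simp [hi, Nat.lt_succ_of_lt hi]
        · simp [hm]

lemma pvLen_le_pvMax_aux (lines : List String) :
    ∀ a : Nat, a ≤ lines.foldl (fun b l => max b (pvLen l)) a := by
  induction lines with
  | nil => intro a; simp
  | cons l ls ih =>
    intro a
    exact le_trans (Nat.le_max_left a (pvLen l)) (ih _)

lemma pvLen_le_fold {l : String} :
    ∀ (lines : List String) (a : Nat), l ∈ lines →
      pvLen l ≤ lines.foldl (fun b x => max b (pvLen x)) a := by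
  intro lines
  induction lines with
  | nil => intro a h; cases h
  | cons x xs ih =>
    intro a h
    rcases List.mem_cons.mp h with rfl | h
    · exact le_trans (Nat.le_max_right a (pvLen l)) (pvLen_le_pvMax_aux xs _)
    · exact ih _ h

lemma pvLen_le_pvMax {l : String} {lines : List String} (h : l ∈ lines) :
    pvLen l ≤ pvMax lines := pvLen_le_fold lines 0 h

lemma pvS_zero {lines : List String} {i : Nat} (h : pvMax lines ≤ i) : pvS lines i = 0 := by
  apply List.sum_eq_zero
  intro x hx
  rcases List.mem_map.mp hx with ⟨l, hl, rfl⟩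
  have := pvLen_le_pvMax hl
  rw [if_neg (by omega)]

lemma pvC_zero {lines : List String} {i : Nat} (h : pvMax lines ≤ i) : pvC lines i = 0 := by
  apply List.sum_eq_zero
  intro x hx
  rcases List.mem_map.mp hx with ⟨l, hl, rfl⟩
  have := pvLen_le_pvMax hl
  rw [if_neg (by omega)]

lemma pvMax_append (P : List String) (l : String) :
    pvMax (P ++ [l]) = max (pvMax P) (pvLen l) := by
  simp [pvMax, List.foldl_append]

lemma foldA_eq (lines : List String) :
    foldA lines = ((List.range (pvMax lines)).map (pvS lines),
                   (List.range (pvMax lines)).map (pvC lines)) := by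
  induction lines using List.reverseRecOn with
  | nil => simp [foldA, pvMax]
  | append_singleton P l ih =>
    unfold foldA at ih ⊢
    rw [List.foldl_append, List.foldl_cons, List.foldl_nil, ih,
      inner_eq l (pvLen l) (pvMax P) (pvS P) (pvC P), pvMax_append]
    have hS : ∀ i, pvS (P ++ [l]) i = pvS P i + (if i < pvLen l then pvVal l i else 0) := by
      intro i; simp [pvS]
    have hC : ∀ i, pvC (P ++ [l]) i = pvC P i + (if i < pvLen l then (1 : Int) else 0) := by
      intro i; simp [pvC]
    simp only [Prod.mk.injEq]
    refine ⟨?_, ?_⟩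
    · apply map_range_congr
      intro i hi
      rw [hS]
      by_cases h1 : i < pvLen l <;> by_cases h2 : i < pvMax P
      · simp [h1, h2]
      · simp [h1, pvS_zero (Nat.le_of_not_lt h2)]
      · simp [h1]
      · simp [h1]
    · apply map_range_congr
      intro i hi
      rw [hC]
      by_cases h1 : i < pvLen l <;> by_cases h2 : i < pvMax P
      · simp [h1, h2]
      · simp [h1, pvC_zero (Nat.le_of_not_lt h2)]
      · simp [h1]
      · simp [h1]

lemma filter_sum (i : Nat) (lines : List String) :
    (((lines.filter (fun line => line.toList.length > i)).map
        (fun line => line.toList.getD i ' ')).map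
      (fun c => ((c.toNat : Int) - 33))).sum = pvS lines i := by
  induction lines with
  | nil => simp [pvS]
  | cons l ls ih =>
    rw [List.filter_cons]
    by_cases h : i < l.length
    · rw [if_pos (by simp [h])]
      simp only [List.map_cons, List.sum_cons]
      rw [ih]
      simp [pvS, pvVal, pvLen, h]
    · rw [if_neg (by simp [h])]
      rw [ih]
      simp [pvS, pvLen, h]

lemma filter_len (i : Nat) (lines : List String) :
    (((lines.filter (fun line => line.toList.length > i)).map
        (fun line => line.toList.getD i ' ')).length : Int) = pvC lines i := by
  induction lines with
  | nil => simp [pvC]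
  | cons l ls ih =>
    rw [List.filter_cons]
    by_cases h : i < l.length
    · rw [if_pos (by simp [h])]
      simp only [List.map_cons, List.length_cons]
      push_cast
      rw [ih]
      simp [pvC, pvLen, h]
      omega
    · rw [if_neg (by simp [h])]
      rw [ih]
      simp [pvC, pvLen, h]

lemma alt_eq (lines : List String) :
    score_getter_alt lines = ((List.range (pvMax lines)).map (pvS lines),
                              (List.range (pvMax lines)).map (pvC lines)) := by
  unfold score_getter_alt
  have hmax : lines.foldl (fun a line => max a line.toList.length) 0 = pvMax lines := by
    simp [pvMax, pvLen]
  rw [hmax]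
  simp only [Prod.mk.injEq]
  refine ⟨?_, ?_⟩
  · apply map_range_congr; intro i _; exact filter_sum i lines
  · apply map_range_congr; intro i _; exact filter_len i lines

-- ===== VERDICT (by name: the statement is the Claim_ definition above) =====
theorem score_getter_spec : Claim_equal_score_getter := by
  intro lines _
  unfold Spec_score_getter
  rw [score_getter_eq_foldA, foldA_eq, alt_eq]
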